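-- pv_equiv track=rewrite | github.com/kelvinhuang0327/number-pattern-research | tmp/backend_archive/lottery_api_legacy/backtest_monte_carlo_strategy.py | calculate_consensus_score
-- ===== SOURCE A (Python) =====
-- def calculate_consensus_score(numbers):
--     """计算共识度得分（越低越好）"""
--     score = 0
--
--     # 生日范围（1-31）权重
--     birthday_count = sum(1 for n in numbers if 1 <= n <= 31)
--     score += birthday_count * 50
--
--     # 幸运数字
--     lucky_numbers = {6, 8, 9, 18, 28, 38}
--     score += sum(10 for n in numbers if n in lucky_numbers)
--
--     # 不吉利数字（降低共识）
--     unlucky_numbers = {4, 13}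
--     score -= sum(5 for n in numbers if n in unlucky_numbers)
--
--     # 连号
--     sorted_nums = sorted(numbers)
--     consecutive_groups = 0
--     for i in range(len(sorted_nums) - 1):
--         if sorted_nums[i+1] - sorted_nums[i] == 1:
--             consecutive_groups += 1
--     score += consecutive_groups * 15
--
--     # 对称号码对
--     symmetry_pairs = 0
--     for n in numbers:
--         mirror = 40 - n
--         if mirror in numbers and n < mirror:
--             symmetry_pairs += 1
--     score += symmetry_pairs * 10
--
--     return score
-- ===== SOURCE B (Python) =====
-- def calculate_consensus_score(numbers):
--     """Same score, computed without sorting: consecutive pairs are counted by set membership."""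
--     num_set = set(numbers)
--     score = 50 * sum(1 for n in numbers if 1 <= n <= 31)
--     score += 10 * sum(1 for n in numbers if n in {6, 8, 9, 18, 28, 38})
--     score -= 5 * sum(1 for n in numbers if n in {4, 13})
--     score += 15 * sum(1 for v in num_set if v + 1 in num_set)
--     score += 10 * sum(1 for n in numbers if 40 - n in num_set and n < 40 - n)
--     return score
-- ===== Notes on version B (the rewrite author's own statement) =====
-- stated objective: faster
-- what changed: A set of the numbers is built once: the sort-and-adjacent-scan counting of consecutive numbers becomes a membership count of values v with v+1 also present (provably equal even with duplicates), and the symmetry test's linear list-membership scan becomes a set lookup; the multiplicity-sensitive sums stay over the list.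
import Mathlib
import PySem

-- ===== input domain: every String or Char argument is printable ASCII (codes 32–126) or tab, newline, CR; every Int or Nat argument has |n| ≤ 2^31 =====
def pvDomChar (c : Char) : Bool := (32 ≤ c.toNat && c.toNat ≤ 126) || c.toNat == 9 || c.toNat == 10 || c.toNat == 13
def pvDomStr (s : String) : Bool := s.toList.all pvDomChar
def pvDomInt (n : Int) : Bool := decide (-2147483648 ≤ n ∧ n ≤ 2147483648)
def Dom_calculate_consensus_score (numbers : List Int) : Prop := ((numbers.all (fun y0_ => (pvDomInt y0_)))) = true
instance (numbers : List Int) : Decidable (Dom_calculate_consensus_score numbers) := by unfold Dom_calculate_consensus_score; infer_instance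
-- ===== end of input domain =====

-- B replaces A's sort-and-adjacent-scan count of consecutive numbers by a set-membership count
-- (distinct v with v+1 also present), removing the sort; the multiplicity-sensitive sums stay over the list.

-- ===== PORT A =====
-- loop indices satisfy 0 ≤ i < i+1 ≤ len-1, always in range, so getD is exact for sorted_nums[i]
def calculate_consensus_score (numbers : List Int) : Int :=
  let score : Int := 0
  let birthday_count : Int := (numbers.map (fun n => if 1 ≤ n ∧ n ≤ 31 then (1 : Int) else 0)).sum
  let score := score + birthday_count * 50
  let score := score + (numbers.map (fun n => if n ∈ ([6, 8, 9, 18, 28, 38] : List Int) then (10 : Int) else 0)).sum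
  let score := score - (numbers.map (fun n => if n ∈ ([4, 13] : List Int) then (5 : Int) else 0)).sum
  let sorted_nums := PySem.List.sorted numbers (fun x => x) false
  let consecutive_groups : Int := (List.range (sorted_nums.length - 1)).foldl
      (fun acc i => if sorted_nums.getD (i + 1) 0 - sorted_nums.getD i 0 = 1 then acc + 1 else acc) 0
  let score := score + consecutive_groups * 15
  let symmetry_pairs : Int := numbers.foldl
      (fun acc n => if (40 - n) ∈ numbers ∧ n < 40 - n then acc + 1 else acc) 0
  let score := score + symmetry_pairs * 10
  score

-- ===== PORT B =====
def calculate_consensus_score_alt (numbers : List Int) : Int :=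
  let num_set : PySem.Set Int := PySem.Set.ofList numbers
  let score : Int := 50 * (numbers.map (fun n => if 1 ≤ n ∧ n ≤ 31 then (1 : Int) else 0)).sum
  let score := score + 10 * (numbers.map (fun n => if n ∈ ([6, 8, 9, 18, 28, 38] : List Int) then (1 : Int) else 0)).sum
  let score := score - 5 * (numbers.map (fun n => if n ∈ ([4, 13] : List Int) then (1 : Int) else 0)).sum
  let score := score + 15 * ((num_set : List Int).map (fun v => if (v + 1) ∈ (num_set : List Int) then (1 : Int) else 0)).sum
  let score := score + 10 * (numbers.map (fun n => if (40 - n) ∈ (num_set : List Int) ∧ n < 40 - n then (1 : Int) else 0)).sum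
  score

-- ===== PRECONDITION & SPEC =====
def Spec_calculate_consensus_score (numbers : List Int) (out : Int) : Prop := out = calculate_consensus_score_alt numbers
instance (numbers : List Int) (out : Int) : Decidable (Spec_calculate_consensus_score numbers out) := by unfold Spec_calculate_consensus_score; infer_instance

-- ===== CLAIM (what is proved, stated in full; the proofs are below) =====
def Claim_equal_calculate_consensus_score : Prop := ∀ (numbers : List Int), Dom_calculate_consensus_score numbers → Spec_calculate_consensus_score numbers (calculate_consensus_score numbers)

-- ===== LEMMAS AND PROOFS =====

-- number of adjacent pairs at distance exactly 1
def adjCount : List Int → Nat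
  | a :: b :: t => (if b - a = 1 then 1 else 0) + adjCount (b :: t)
  | _ => 0

-- A's index loop counts exactly the adjacent pairs at distance 1
theorem countP_range_eq_adjCount (s : List Int) :
    List.countP (fun i => decide (s.getD (i + 1) 0 - s.getD i 0 = 1)) (List.range (s.length - 1))
      = adjCount s := by
  induction s with
  | nil => rfl
  | cons a rest ih =>
    cases rest with
    | nil => rfl
    | cons b t =>
      have hlen : (a :: b :: t).length - 1 = t.length + 1 := by simp
      rw [hlen, List.range_succ_eq_map, List.countP_cons, List.countP_map]
      have hlen' : (b :: t).length - 1 = t.length := by simp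
      rw [hlen'] at ih
      have hp : (fun i => decide ((a :: b :: t).getD (i + 1) 0 - (a :: b :: t).getD i 0 = 1)) ∘ Nat.succ
          = fun i => decide ((b :: t).getD (i + 1) 0 - (b :: t).getD i 0 = 1) := by
        funext i; simp
      rw [hp, ih]
      simp [adjCount, Nat.add_comm]

-- countP over a duplicate-free list is the Finset filter card
theorem countP_nodup (l : List Int) (hl : l.Nodup) (p : Int → Bool) :
    List.countP p l = (l.toFinset.filter (fun v => p v = true)).card := by
  rw [List.countP_eq_length_filter]
  rw [← List.toFinset_filter]
  exact (List.toFinset_card_of_nodup (hl.filter p)).symm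

-- on a nondecreasing list, adjCount is the number of distinct values v with v+1 present
theorem adjCount_sorted (s : List Int) (hs : List.Pairwise (· ≤ ·) s) :
    adjCount s = (s.toFinset.filter (fun v => v + 1 ∈ s)).card := by
  induction s with
  | nil => rfl
  | cons a rest ih =>
    cases rest with
    | nil => simp [adjCount, Finset.filter_singleton]
    | cons b t =>
      obtain ⟨ha, hp'⟩ := List.pairwise_cons.mp hs
      have hab : a ≤ b := ha b (by simp)
      have hIH := ih hp'
      by_cases hlt : a < b
      · have hnotmem : a ∉ (b :: t).toFinset := by
          simp only [List.mem_toFinset]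
          intro hmem
          rcases List.mem_cons.mp hmem with h | h
          · omega
          · have := (List.pairwise_cons.mp hp').1 a h; omega
        have hins : (a :: b :: t).toFinset = insert a (b :: t).toFinset := by simp
        have hge : ∀ x ∈ b :: t, b ≤ x := by
          intro x hx
          rcases List.mem_cons.mp hx with h | h
          · omega
          · exact (List.pairwise_cons.mp hp').1 x h
        have hcongr : Finset.filter (fun v => v + 1 ∈ a :: b :: t) (b :: t).toFinset
            = Finset.filter (fun v => v + 1 ∈ b :: t) (b :: t).toFinset := by
          apply Finset.filter_congr
          intro v hv
          have hvb : b ≤ v := hge v (List.mem_toFinset.mp hv)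
          simp only [List.mem_cons]
          constructor
          · rintro (h | h)
            · omega
            · exact h
          · intro h; right; exact h
        have hpa : (a + 1 ∈ a :: b :: t) ↔ (b - a = 1) := by
          constructor
          · intro h
            rcases List.mem_cons.mp h with h | h
            · omega
            · have := hge _ h; omega
          · intro h; exact List.mem_cons.mpr (Or.inr (by rw [show b = a + 1 by omega]; simp))
        rw [hins, Finset.filter_insert, hcongr]
        split_ifs with hmem
        · have hc : b - a = 1 := hpa.mp hmem
          rw [Finset.card_insert_of_notMem (fun hm => hnotmem (Finset.mem_of_mem_filter _ hm))]
          simp [adjCount, hc, hIH, Nat.add_comm]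
        · have hc : ¬ (b - a = 1) := fun h => hmem (hpa.mpr h)
          simp [adjCount, hc, hIH]
      · have hab' : a = b := by omega
        subst hab'
        have hfs : (a :: a :: t).toFinset = (a :: t).toFinset := by simp
        have hmemiff : ∀ v, (v + 1 ∈ a :: a :: t) ↔ (v + 1 ∈ a :: t) := by
          intro v; simp [List.mem_cons]
        have : Finset.filter (fun v => v + 1 ∈ a :: a :: t) (a :: t).toFinset
            = Finset.filter (fun v => v + 1 ∈ a :: t) (a :: t).toFinset := by
          apply Finset.filter_congr; intro v _; exact hmemiff v
        rw [hfs, this]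
        simpa [adjCount] using hIH

theorem sum_map_ite_const (c : Int) (p : Int → Prop) [DecidablePred p] (l : List Int) :
    (l.map (fun n => if p n then c else 0)).sum = c * (l.map (fun n => if p n then (1 : Int) else 0)).sum := by
  rw [← List.sum_map_mul_left]
  rw [List.map_congr_left (g := fun n => c * if p n then (1:Int) else 0)]
  intro n _
  by_cases h : p n <;> simp [h]

-- A's diff-1 scan of the sorted list = B's count of distinct v with v+1 in the set
theorem consec_bridge (numbers : List Int) :
    (List.countP (fun i => decide ((PySem.List.sorted numbers (fun x => x) false).getD (i + 1) 0 - (PySem.List.sorted numbers (fun x => x) false).getD i 0 = 1)) (List.range ((PySem.List.sorted numbers (fun x => x) false).length - 1)))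
      = List.countP (fun v => decide ((v + 1) ∈ (PySem.Set.ofList numbers : List Int))) (PySem.Set.ofList numbers : List Int) := by
  rw [countP_range_eq_adjCount]
  rw [adjCount_sorted _ (PySem.List.sorted_pairwise numbers (fun x => x))]
  rw [countP_nodup _ (PySem.Set.nodup_ofList numbers)]
  congr 1
  ext v
  simp only [Finset.mem_filter, List.mem_toFinset, PySem.List.mem_sorted, PySem.Set.mem_ofList,
    decide_eq_true_eq]

theorem a_eq_b (numbers : List Int) : calculate_consensus_score numbers = calculate_consensus_score_alt numbers := by
  unfold calculate_consensus_score calculate_consensus_score_alt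
  dsimp only
  have hconsA : (List.range ((PySem.List.sorted numbers (fun x => x) false).length - 1)).foldl
      (fun acc i => if (PySem.List.sorted numbers (fun x => x) false).getD (i + 1) 0 - (PySem.List.sorted numbers (fun x => x) false).getD i 0 = 1 then acc + 1 else acc) (0 : Int)
      = (List.countP (fun v => decide ((v + 1) ∈ (PySem.Set.ofList numbers : List Int))) (PySem.Set.ofList numbers : List Int) : Int) := by
    have h := PySem.List.foldl_count_if (fun i => decide ((PySem.List.sorted numbers (fun x => x) false).getD (i + 1) 0 - (PySem.List.sorted numbers (fun x => x) false).getD i 0 = 1)) (List.range ((PySem.List.sorted numbers (fun x => x) false).length - 1)) 0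
    simp only [decide_eq_true_eq, zero_add] at h
    rw [h, consec_bridge]
  have hconsB : ((PySem.Set.ofList numbers : List Int).map (fun v => if (v + 1) ∈ (PySem.Set.ofList numbers : List Int) then (1 : Int) else 0)).sum
      = (List.countP (fun v => decide ((v + 1) ∈ (PySem.Set.ofList numbers : List Int))) (PySem.Set.ofList numbers : List Int) : Int) := by
    simpa using PySem.List.sum_map_ite_one_zero (fun v => decide ((v + 1) ∈ (PySem.Set.ofList numbers : List Int))) (PySem.Set.ofList numbers : List Int)
  have hsymA : numbers.foldl (fun acc n => if (40 - n) ∈ numbers ∧ n < 40 - n then acc + 1 else acc) (0 : Int)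
      = (List.countP (fun n => decide ((40 - n) ∈ numbers ∧ n < 40 - n)) numbers : Int) := by
    have h := PySem.List.foldl_count_if (fun n => decide ((40 - n) ∈ numbers ∧ n < 40 - n)) numbers 0
    simp only [decide_eq_true_eq, zero_add] at h
    exact h
  have hsymB : (numbers.map (fun n => if (40 - n) ∈ (PySem.Set.ofList numbers : List Int) ∧ n < 40 - n then (1 : Int) else 0)).sum
      = (List.countP (fun n => decide ((40 - n) ∈ numbers ∧ n < 40 - n)) numbers : Int) := by
    have h := PySem.List.sum_map_ite_one_zero (fun n => decide ((40 - n) ∈ (PySem.Set.ofList numbers : List Int) ∧ n < 40 - n)) numbers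
    simp only [decide_eq_true_eq] at h
    rw [h]
    congr 1
    apply List.countP_congr
    intro n _
    simp [PySem.Set.mem_ofList]
  rw [hconsA, hsymA, hsymB, hconsB,
    sum_map_ite_const 10 (fun n => n ∈ ([6, 8, 9, 18, 28, 38] : List Int)) numbers,
    sum_map_ite_const 5 (fun n => n ∈ ([4, 13] : List Int)) numbers]
  ring

-- ===== VERDICT (by name: the statement is the Claim_ definition above) =====
theorem calculate_consensus_score_spec : Claim_equal_calculate_consensus_score := by
  intro numbers _
  unfold Spec_calculate_consensus_score
  exact a_eq_b numbers
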